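-- pv_equiv track=rewrite | github.com/SukiYume/XiaoQing | plugins/xiaoqing_chat/reply_splitter.py | _split_chat_reply
-- ===== SOURCE A (Python) =====
-- def _split_chat_reply(text: str) -> list[str]:
--     """
--     将聊天回复按换行符拆分成多条消息
--
--     Args:
--         text: 完整的聊天回复文本
--
--     Returns:
--         拆分后的消息列表
--     """
--     if not text:
--         return []
--
--     lines = text.split("\n")
--     messages = []
--     current_code_block = []
--     in_code_block = False
--
--     for line in lines:
--         stripped = line.strip()
--
--         # 处理代码块标记
--         if stripped.startswith("```"):
--             if in_code_block:
--                 # 代码块结束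
--                 current_code_block.append(line)
--                 messages.append("\n".join(current_code_block))
--                 current_code_block = []
--                 in_code_block = False
--             else:
--                 # 代码块开始
--                 in_code_block = True
--                 current_code_block.append(line)
--             continue
--
--         if in_code_block:
--             current_code_block.append(line)
--         else:
--             # 普通文本，按行拆分
--             if stripped:
--                 messages.append(stripped)
--
--     # 处理未闭合的代码块（作为最后一条消息）
--     if current_code_block:
--         messages.append("\n".join(current_code_block))
--
--     return messages
-- ===== SOURCE B (Python) =====
-- def _split_chat_reply(text: str) -> list[str]:
--     """Index-based rewrite: nested consume-until-fence scan instead of a boolean state flag."""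
--     lines = text.split("\n")
--     messages = []
--     i = 0
--     n = len(lines)
--     while i < n:
--         line = lines[i]
--         stripped = line.strip()
--         if stripped.startswith("```"):
--             block = [line]
--             i += 1
--             while i < n and not lines[i].strip().startswith("```"):
--                 block.append(lines[i])
--                 i += 1
--             if i < n:
--                 block.append(lines[i])
--                 i += 1
--             messages.append("\n".join(block))
--         else:
--             if stripped:
--                 messages.append(stripped)
--             i += 1
--     return messages
-- ===== Notes on version B (the rewrite author's own statement) =====
-- stated objective: alternative
-- what changed: Replaces A's boolean in_code_block state flag and accumulator with an index-driven scan whose nested inner loop consumes a whole code block (up to and including the closing fence, or the end) in one step, emitting each block immediately instead of flushing leftover state after the loop.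
import Mathlib
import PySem

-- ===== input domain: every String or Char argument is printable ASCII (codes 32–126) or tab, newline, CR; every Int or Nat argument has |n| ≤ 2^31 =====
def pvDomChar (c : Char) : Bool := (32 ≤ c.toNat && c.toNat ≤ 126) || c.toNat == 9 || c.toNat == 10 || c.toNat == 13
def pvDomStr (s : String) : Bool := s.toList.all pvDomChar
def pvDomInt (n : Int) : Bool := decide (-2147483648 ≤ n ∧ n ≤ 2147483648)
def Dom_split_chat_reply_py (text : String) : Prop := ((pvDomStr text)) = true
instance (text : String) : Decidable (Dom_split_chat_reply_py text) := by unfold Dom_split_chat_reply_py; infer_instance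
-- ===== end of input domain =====

-- B replaces A's boolean in-code-block state flag by a nested consume-until-fence scan (alternative decomposition; same cost).


-- ===== PORT A =====
-- state = (messages, current_code_block, in_code_block); one fold step per line, branches in A's order
def pvAStep (s : List String × List String × Bool) (line : String) : List String × List String × Bool :=
  let messages := s.1
  let current := s.2.1
  let inb := s.2.2
  let stripped := PySem.Str.strip line
  if PySem.Str.startswith stripped "```" then
    if inb then
      (messages ++ [PySem.Str.join "\n" (current ++ [line])], [], false)
    else
      (messages, current ++ [line], true)
  else if inb then
    (messages, current ++ [line], inb)
  else if stripped ≠ "" then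
    (messages ++ [stripped], current, inb)
  else
    (messages, current, inb)

def split_chat_reply_py (text : String) : List String :=
  if text = "" then []
  else
    let lines := (PySem.Str.split? text "\n").getD []  -- sep "\n" ≠ "", so never none
    let st := lines.foldl pvAStep ([], [], false)
    if st.2.1 ≠ [] then st.1 ++ [PySem.Str.join "\n" st.2.1] else st.1

-- ===== PORT B =====
-- inner while loop of Source B: collect original lines until a fence line (inclusive) or the end
def pvAltConsume : List String → List String × List String
  | [] => ([], [])
  | l :: rest =>
    if PySem.Str.startswith (PySem.Str.strip l) "```" then ([l], rest)
    else ((l :: (pvAltConsume rest).1), (pvAltConsume rest).2)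

theorem pvAltConsume_len_le : ∀ (xs : List String), (pvAltConsume xs).2.length ≤ xs.length := by
  intro xs
  induction xs with
  | nil => simp [pvAltConsume]
  | cons l rest ih =>
    simp only [pvAltConsume]
    split
    · simp
    · simpa using Nat.le_succ_of_le ih

-- outer while loop of Source B, as structural recursion on the remaining lines
def pvAltGo : List String → List String
  | [] => []
  | l :: rest =>
    let stripped := PySem.Str.strip l
    if PySem.Str.startswith stripped "```" then
      PySem.Str.join "\n" (l :: (pvAltConsume rest).1) :: pvAltGo (pvAltConsume rest).2
    else if stripped ≠ "" then
      stripped :: pvAltGo rest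
    else
      pvAltGo rest
termination_by xs => xs.length
decreasing_by
  · exact Nat.lt_succ_of_le (pvAltConsume_len_le rest)
  · simp
  · simp

def split_chat_reply_py_alt (text : String) : List String :=
  pvAltGo ((PySem.Str.split? text "\n").getD [])

-- ===== PRECONDITION & SPEC =====
def Spec_split_chat_reply_py (text : String) (out : List String) : Prop := out = split_chat_reply_py_alt text
instance (text : String) (out : List String) : Decidable (Spec_split_chat_reply_py text out) := by unfold Spec_split_chat_reply_py; infer_instance

-- ===== CLAIM (what is proved, stated in full; the proofs are below) =====
def Claim_equal_split_chat_reply_py : Prop := ∀ (text : String), Dom_split_chat_reply_py text → Spec_split_chat_reply_py text (split_chat_reply_py text)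

-- ===== LEMMAS AND PROOFS =====

-- A's final flush of the state
def pvFinalize (st : List String × List String × Bool) : List String :=
  if st.2.1 ≠ [] then st.1 ++ [PySem.Str.join "\n" st.2.1] else st.1

-- the invariant linking A's state machine to B's two loops, both modes at once
theorem pvMain : ∀ (lines : List String),
    (∀ msgs, pvFinalize (lines.foldl pvAStep (msgs, [], false)) = msgs ++ pvAltGo lines) ∧
    (∀ msgs cur, cur ≠ [] →
      pvFinalize (lines.foldl pvAStep (msgs, cur, true)) =
        msgs ++ PySem.Str.join "\n" (cur ++ (pvAltConsume lines).1) :: pvAltGo (pvAltConsume lines).2) := by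
  intro lines
  induction lines with
  | nil =>
    constructor
    · intro msgs; simp [pvFinalize, pvAltGo]
    · intro msgs cur hcur
      simp [pvFinalize, pvAltConsume, pvAltGo, hcur]
  | cons l rest ih =>
    constructor
    · intro msgs
      by_cases hf : PySem.Str.startswith (PySem.Str.strip l) "```"
      · have h1 : List.foldl pvAStep (msgs, [], false) (l :: rest) =
            List.foldl pvAStep (msgs, [l], true) rest := by simp [pvAStep, show PySem.Chars.startswith (PySem.Chars.strip l.toList) ['`','`','`'] = true from by simpa using hf]
        rw [h1, (ih.2) msgs [l] (by simp)]
        have hf' : PySem.Chars.startswith (PySem.Chars.strip l.toList) ['`','`','`'] = true := by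
          simpa using hf
        simp [pvAltGo, hf']
      · by_cases hs : PySem.Str.strip l = ""
        · have h1 : List.foldl pvAStep (msgs, [], false) (l :: rest) =
              List.foldl pvAStep (msgs, [], false) rest := by simp [pvAStep, hs, show PySem.Chars.startswith [] ['`','`','`'] = false from rfl]
          rw [h1, ih.1 msgs]
          have hf' : PySem.Chars.startswith (PySem.Chars.strip l.toList) ['`','`','`'] = false := by
            simpa using hf
          simp [pvAltGo, hs, show PySem.Chars.startswith [] ['`','`','`'] = false from rfl]
        · have h1 : List.foldl pvAStep (msgs, [], false) (l :: rest) =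
              List.foldl pvAStep (msgs ++ [PySem.Str.strip l], [], false) rest := by
            simp [pvAStep, hs, show PySem.Chars.startswith (PySem.Chars.strip l.toList) ['`','`','`'] = false from by simpa using hf]
          rw [h1, ih.1 (msgs ++ [PySem.Str.strip l])]
          have hf' : PySem.Chars.startswith (PySem.Chars.strip l.toList) ['`','`','`'] = false := by
            simpa using hf
          simp [pvAltGo, hf', hs]
    · intro msgs cur hcur
      by_cases hf : PySem.Str.startswith (PySem.Str.strip l) "```"
      · have h1 : List.foldl pvAStep (msgs, cur, true) (l :: rest) =
            List.foldl pvAStep (msgs ++ [PySem.Str.join "\n" (cur ++ [l])], [], false) rest := by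
          simp [pvAStep, show PySem.Chars.startswith (PySem.Chars.strip l.toList) ['`','`','`'] = true from by simpa using hf]
        rw [h1, ih.1 (msgs ++ [PySem.Str.join "\n" (cur ++ [l])])]
        have hf' : PySem.Chars.startswith (PySem.Chars.strip l.toList) ['`','`','`'] = true := by
          simpa using hf
        simp [pvAltConsume, hf']
      · have h1 : List.foldl pvAStep (msgs, cur, true) (l :: rest) =
            List.foldl pvAStep (msgs, cur ++ [l], true) rest := by simp [pvAStep, show PySem.Chars.startswith (PySem.Chars.strip l.toList) ['`','`','`'] = false from by simpa using hf]
        rw [h1, ih.2 msgs (cur ++ [l]) (by simp)]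
        have hf' : PySem.Chars.startswith (PySem.Chars.strip l.toList) ['`','`','`'] = false := by
          simpa using hf
        simp [pvAltConsume, hf']

-- ===== VERDICT (by name: the statement is the Claim_ definition above) =====
theorem split_chat_reply_py_spec : Claim_equal_split_chat_reply_py := by
  intro text _
  unfold Spec_split_chat_reply_py split_chat_reply_py split_chat_reply_py_alt
  by_cases h : text = ""
  · subst h
    have h1 : (PySem.Str.split? "" "\n").getD [] = [""] := rfl
    rw [if_pos rfl, h1]
    simp [pvAltGo, show PySem.Chars.startswith [] ['`','`','`'] = false from rfl,
      show PySem.Str.strip "" = "" from rfl]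
  · rw [if_neg h]
    simpa [pvFinalize] using (pvMain ((PySem.Str.split? text "\n").getD [])).1 []
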